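-- pv_equiv track=rewrite | github.com/schlebachlab/PRF-Search | TMD-Slip Motif Search/TMD-slip motif search and frameshifted peptide prediction/enhanced_harrington_search_single_ss_per_tmd_v120_fix_motif_table_all.py | split_up_harrington_motifs
-- ===== SOURCE A (Python) =====
-- def split_up_harrington_motifs(harrington_motifs, location_ideality_threshold, stem_loop_required=False):
--     '''
--     canonical_status = filtered_list[6]
--     ensembl_uniprot_annotation = filtered_list[7]
--     ensembl_transcript_type = filtered_list[8]
--     Searches for Harrington motifs by first scanning each transcript for slip–site candidates
--     using get_slipsite_candidates (with candidate_filter ensuring the slipsite is in slipsite_list).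
--     Then, for each candidate, enriches it with additional features to form a candidate entry with fields:
--       [0] transcript_id
--       [1] gene_id
--       [2] gene_name
--       [3] tm_start (1-indexed)
--       [4] tm_end (1-indexed)
--       [5] tm_dg
--       [6] tm_domain_str (the protein segment corresponding to the TMD)
--       [7] tm_codons_str (the coding sequence for the TMD)
--       [8] ss_coordinate_nuc
--       [9] ss_coordinate_codon
--       [10] chr_coordinate
--       [11] candidate_slipsite (the 7-nt slipsite)
--       [12] gap_size (in codons)
--       [13] deviation from ideal (gap_size - 45)
--       [14] gap_nuc (nucleotide sequence between TMD and slip site)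
--       [15] gap_gc_content (% GC in gap)
--       [16] gap_avg_codon_freq (average codon frequency in gap)
--       [17] fs_peptide (frameshifted peptide downstream)
--       [18] terminated (whether translation terminated with a stop)
--       [19] transcript_seq (nucleotide sequence)
--       [20] transcript_residues_str (protein sequence)
--       [21] friction_score
--       [22] slipsite_strict ("Strict" if slipsite in set_24_canonical_slipsites else "Loose")
--       [23] stem_loop_found ("Yes" or "No")
--       [24] pseudoknot_found ("Yes" or "No")
--       [25] secondary_structure (predicted structure)
--       [26] canonical_status_ensembl_annotation
--       [27] tmd_type
--       [28] tmd_orientation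
--       [29] transcript_type_ensembl_annotation
--       [30] ensembl_transcript_aliases
--       [31] uniprot_annotation_ensembl
--       [32] uniprot_id_blasp
--       [33] blasp_similarity_score
--     '''
--
--     # Initialize strict subsets
--     strict_all_motifs = []
--     strict_canonical_motifs = []
--     strict_alternative_motifs = []
--
--     # Initialize loose subsets
--     loose_all_motifs = []
--     loose_canonical_motifs = []
--     loose_alternative_motifs = []
--
--     for entry in harrington_motifs:
--         location_ideality = abs(int(entry[13]))
--         slipsite_strict = entry[22]
--         canonical_status = entry[26]
--         terminated_status = entry[18]
--         stem_loop_presence = entry[23]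
--
--         subset_dimensions = [slipsite_strict, canonical_status]
--
--         if all([location_ideality <= location_ideality_threshold,
--                 stem_loop_required == True,
--                 stem_loop_presence == 'yes']) or all([stem_loop_required == False,
--                                                       location_ideality <= location_ideality_threshold]):
--
--             if subset_dimensions == ['Strict', 'Canonical']:
--                 strict_all_motifs.append(entry)
--                 strict_canonical_motifs.append(entry)
--                 loose_all_motifs.append(entry)
--                 loose_canonical_motifs.append(entry)
--
--             if subset_dimensions == ['Strict', 'Alternative']:
--                 strict_all_motifs.append(entry)
--                 strict_alternative_motifs.append(entry)
--                 loose_all_motifs.append(entry)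
--                 loose_alternative_motifs.append(entry)
--
--             if subset_dimensions == ['Loose', 'Canonical']:
--                 loose_all_motifs.append(entry)
--                 loose_canonical_motifs.append(entry)
--
--             if subset_dimensions == ['Loose', 'Alternative']:
--                 loose_all_motifs.append(entry)
--                 loose_alternative_motifs.append(entry)
--
--
--     motif_subsets = [strict_all_motifs, strict_canonical_motifs, strict_alternative_motifs, loose_all_motifs, loose_canonical_motifs, loose_alternative_motifs]
--
--     return motif_subsets
-- ===== SOURCE B (Python) =====
-- def split_up_harrington_motifs(harrington_motifs, location_ideality_threshold, stem_loop_required=False):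
--     def gate(e):
--         return abs(int(e[13])) <= location_ideality_threshold and (not stem_loop_required or e[23] == 'yes')
--
--     passed = [e for e in harrington_motifs if gate(e)]
--
--     def kind(e):
--         return (e[22], e[26])
--
--     SC = ('Strict', 'Canonical')
--     SA = ('Strict', 'Alternative')
--     LC = ('Loose', 'Canonical')
--     LA = ('Loose', 'Alternative')
--
--     strict_all = [e for e in passed if kind(e) in (SC, SA)]
--     strict_canonical = [e for e in passed if kind(e) == SC]
--     strict_alternative = [e for e in passed if kind(e) == SA]
--     loose_all = [e for e in passed if kind(e) in (SC, SA, LC, LA)]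
--     loose_canonical = [e for e in passed if kind(e) in (SC, LC)]
--     loose_alternative = [e for e in passed if kind(e) in (SA, LA)]
--
--     return [strict_all, strict_canonical, strict_alternative,
--             loose_all, loose_canonical, loose_alternative]
-- ===== Notes on version B (the rewrite author's own statement) =====
-- stated objective: simpler
-- what changed: Replaces the single loop that appends each entry to up to four of six mutable accumulators behind nested equality-on-list branches by one gate-filtered 'passed' list and six independent comprehensions, one per bucket.
import Mathlib
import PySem

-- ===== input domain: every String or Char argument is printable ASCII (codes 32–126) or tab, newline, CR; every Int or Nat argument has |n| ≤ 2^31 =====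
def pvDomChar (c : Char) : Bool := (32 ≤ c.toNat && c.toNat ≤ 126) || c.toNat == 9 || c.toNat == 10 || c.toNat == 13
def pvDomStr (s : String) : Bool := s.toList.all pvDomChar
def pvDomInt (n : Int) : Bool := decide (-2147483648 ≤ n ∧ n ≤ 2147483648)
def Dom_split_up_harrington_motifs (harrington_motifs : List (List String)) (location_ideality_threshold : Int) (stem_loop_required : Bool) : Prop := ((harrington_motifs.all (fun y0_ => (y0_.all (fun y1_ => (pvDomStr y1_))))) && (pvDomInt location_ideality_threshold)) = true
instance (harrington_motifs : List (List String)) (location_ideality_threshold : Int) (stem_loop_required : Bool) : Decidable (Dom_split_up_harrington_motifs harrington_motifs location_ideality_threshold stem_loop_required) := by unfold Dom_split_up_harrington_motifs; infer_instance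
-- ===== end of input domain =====

-- ===== PORT A =====
-- B rewrites A's one loop with six mutable accumulators as a gate-filtered list plus six independent comprehensions (objective: simpler).
-- A-side loop step: the body of A's for-loop, threading the six accumulator lists.
def pvAStep (location_ideality_threshold : Int) (stem_loop_required : Bool)
    (st : List (List String) × List (List String) × List (List String) × List (List String) × List (List String) × List (List String))
    (entry : List String) :
    List (List String) × List (List String) × List (List String) × List (List String) × List (List String) × List (List String) :=
  let location_ideality : Int := |(PySem.Int.ofStr? ((PySem.List.pyGet? entry 13).getD "")).getD 0|
  let slipsite_strict := (PySem.List.pyGet? entry 22).getD ""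
  let canonical_status := (PySem.List.pyGet? entry 26).getD ""
  let _terminated_status := (PySem.List.pyGet? entry 18).getD ""
  let stem_loop_presence := (PySem.List.pyGet? entry 23).getD ""
  let subset_dimensions := [slipsite_strict, canonical_status]
  let (sA, sC, sX, lA, lC, lX) := st
  if (decide (location_ideality ≤ location_ideality_threshold) && (stem_loop_required == true) && (stem_loop_presence == "yes"))
      || ((stem_loop_required == false) && decide (location_ideality ≤ location_ideality_threshold)) then
    let (sA, sC, lA, lC) :=
      if subset_dimensions == ["Strict", "Canonical"] then
        (sA ++ [entry], sC ++ [entry], lA ++ [entry], lC ++ [entry])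
      else (sA, sC, lA, lC)
    let (sA, sX, lA, lX) :=
      if subset_dimensions == ["Strict", "Alternative"] then
        (sA ++ [entry], sX ++ [entry], lA ++ [entry], lX ++ [entry])
      else (sA, sX, lA, lX)
    let (lA, lC) :=
      if subset_dimensions == ["Loose", "Canonical"] then
        (lA ++ [entry], lC ++ [entry])
      else (lA, lC)
    let (lA, lX) :=
      if subset_dimensions == ["Loose", "Alternative"] then
        (lA ++ [entry], lX ++ [entry])
      else (lA, lX)
    (sA, sC, sX, lA, lC, lX)
  else (sA, sC, sX, lA, lC, lX)

def split_up_harrington_motifs (harrington_motifs : List (List String)) (location_ideality_threshold : Int) (stem_loop_required : Bool) : List (List (List String)) :=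
  let (sA, sC, sX, lA, lC, lX) :=
    harrington_motifs.foldl (pvAStep location_ideality_threshold stem_loop_required) ([], [], [], [], [], [])
  [sA, sC, sX, lA, lC, lX]

-- ===== PORT B =====
def pvGate (location_ideality_threshold : Int) (stem_loop_required : Bool) (e : List String) : Bool :=
  decide (|(PySem.Int.ofStr? ((PySem.List.pyGet? e 13).getD "")).getD 0| ≤ location_ideality_threshold)
    && (!stem_loop_required || ((PySem.List.pyGet? e 23).getD "") == "yes")

def pvKind (e : List String) : String × String :=
  ((PySem.List.pyGet? e 22).getD "", (PySem.List.pyGet? e 26).getD "")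

def split_up_harrington_motifs_alt (harrington_motifs : List (List String)) (location_ideality_threshold : Int) (stem_loop_required : Bool) : List (List (List String)) :=
  let passed := harrington_motifs.filter (pvGate location_ideality_threshold stem_loop_required)
  let SC : String × String := ("Strict", "Canonical")
  let SA : String × String := ("Strict", "Alternative")
  let LC : String × String := ("Loose", "Canonical")
  let LA : String × String := ("Loose", "Alternative")
  [passed.filter (fun e => [SC, SA].contains (pvKind e)),
   passed.filter (fun e => pvKind e == SC),
   passed.filter (fun e => pvKind e == SA),
   passed.filter (fun e => [SC, SA, LC, LA].contains (pvKind e)),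
   passed.filter (fun e => [SC, LC].contains (pvKind e)),
   passed.filter (fun e => [SA, LA].contains (pvKind e))]

-- ===== PRECONDITION & SPEC =====
-- Pre_ excludes inputs on which A raises: an entry shorter than 27 fields (IndexError) or whose
-- field 13 is not an int-like string (ValueError from int()).
def Pre_split_up_harrington_motifs (harrington_motifs : List (List String)) (location_ideality_threshold : Int) (stem_loop_required : Bool) : Prop :=
  ∀ e ∈ harrington_motifs, 27 ≤ e.length ∧ (PySem.Int.ofStr? ((PySem.List.pyGet? e 13).getD "")).isSome
instance (harrington_motifs : List (List String)) (location_ideality_threshold : Int) (stem_loop_required : Bool) : Decidable (Pre_split_up_harrington_motifs harrington_motifs location_ideality_threshold stem_loop_required) := by unfold Pre_split_up_harrington_motifs; infer_instance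

def pvWitness_split_up_harrington_motifs : List (List String) × Int × Bool :=
  ([["", "", "", "", "", "", "", "", "", "", "", "", "", "3", "", "", "", "", "no", "", "", "", "Strict", "yes", "", "", "Canonical"]], 5, false)

def Spec_split_up_harrington_motifs (harrington_motifs : List (List String)) (location_ideality_threshold : Int) (stem_loop_required : Bool) (out : List (List (List String))) : Prop := out = split_up_harrington_motifs_alt harrington_motifs location_ideality_threshold stem_loop_required
instance (harrington_motifs : List (List String)) (location_ideality_threshold : Int) (stem_loop_required : Bool) (out : List (List (List String))) : Decidable (Spec_split_up_harrington_motifs harrington_motifs location_ideality_threshold stem_loop_required out) := by unfold Spec_split_up_harrington_motifs; infer_instance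

-- ===== CLAIM (what is proved, stated in full; the proofs are below) =====
def Claim_equal_split_up_harrington_motifs : Prop := ∀ (harrington_motifs : List (List String)) (location_ideality_threshold : Int) (stem_loop_required : Bool), Dom_split_up_harrington_motifs harrington_motifs location_ideality_threshold stem_loop_required → Pre_split_up_harrington_motifs harrington_motifs location_ideality_threshold stem_loop_required → Spec_split_up_harrington_motifs harrington_motifs location_ideality_threshold stem_loop_required (split_up_harrington_motifs harrington_motifs location_ideality_threshold stem_loop_required)

-- ===== LEMMAS AND PROOFS =====

-- A's gate boolean equals B's gate.
theorem pvGate_eq (th : Int) (slr : Bool) (e : List String) :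
    ((decide (|(PySem.Int.ofStr? ((PySem.List.pyGet? e 13).getD "")).getD 0| ≤ th) && (slr == true) && (((PySem.List.pyGet? e 23).getD "") == "yes"))
      || ((slr == false) && decide (|(PySem.Int.ofStr? ((PySem.List.pyGet? e 13).getD "")).getD 0| ≤ th)))
    = pvGate th slr e := by
  cases slr <;> simp [pvGate]

-- One step of A's loop, expressed component-wise with B's gate and kind predicates.
theorem pvAStep_eq (th : Int) (slr : Bool) (sA sC sX lA lC lX : List (List String)) (e : List String) :
    pvAStep th slr (sA, sC, sX, lA, lC, lX) e =
      if pvGate th slr e then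
        (sA ++ (if [(("Strict","Canonical") : String × String), ("Strict","Alternative")].contains (pvKind e) then [e] else []),
         sC ++ (if pvKind e == (("Strict","Canonical") : String × String) then [e] else []),
         sX ++ (if pvKind e == (("Strict","Alternative") : String × String) then [e] else []),
         lA ++ (if [(("Strict","Canonical") : String × String), ("Strict","Alternative"), ("Loose","Canonical"), ("Loose","Alternative")].contains (pvKind e) then [e] else []),
         lC ++ (if [(("Strict","Canonical") : String × String), ("Loose","Canonical")].contains (pvKind e) then [e] else []),
         lX ++ (if [(("Strict","Alternative") : String × String), ("Loose","Alternative")].contains (pvKind e) then [e] else []))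
      else (sA, sC, sX, lA, lC, lX) := by
  simp only [pvAStep, pvKind]
  rw [pvGate_eq]
  by_cases hG : pvGate th slr e = true
  · simp only [hG, if_true]
    by_cases hx : (PySem.List.pyGet? e 22).getD "" = "Strict" <;>
      by_cases hy : (PySem.List.pyGet? e 26).getD "" = "Canonical" <;>
      by_cases hy' : (PySem.List.pyGet? e 26).getD "" = "Alternative" <;>
      by_cases hx' : (PySem.List.pyGet? e 22).getD "" = "Loose" <;> simp_all
  · simp [hG]

-- Loop invariant: A's foldl extends each accumulator by the corresponding filtered list.
theorem pvFold_inv (th : Int) (slr : Bool) (xs : List (List String))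
    (sA sC sX lA lC lX : List (List String)) :
    xs.foldl (pvAStep th slr) (sA, sC, sX, lA, lC, lX)
      = (sA ++ (xs.filter (pvGate th slr)).filter (fun e => [(("Strict","Canonical") : String × String), ("Strict","Alternative")].contains (pvKind e)),
         sC ++ (xs.filter (pvGate th slr)).filter (fun e => pvKind e == (("Strict","Canonical") : String × String)),
         sX ++ (xs.filter (pvGate th slr)).filter (fun e => pvKind e == (("Strict","Alternative") : String × String)),
         lA ++ (xs.filter (pvGate th slr)).filter (fun e => [(("Strict","Canonical") : String × String), ("Strict","Alternative"), ("Loose","Canonical"), ("Loose","Alternative")].contains (pvKind e)),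
         lC ++ (xs.filter (pvGate th slr)).filter (fun e => [(("Strict","Canonical") : String × String), ("Loose","Canonical")].contains (pvKind e)),
         lX ++ (xs.filter (pvGate th slr)).filter (fun e => [(("Strict","Alternative") : String × String), ("Loose","Alternative")].contains (pvKind e))) := by
  induction xs generalizing sA sC sX lA lC lX with
  | nil => simp
  | cons e xs ih =>
    rw [List.foldl_cons, pvAStep_eq]
    by_cases hG : pvGate th slr e = true
    · simp [hG, ih]
      split_ifs <;> simp_all [List.filter_cons]
    · have hG' : pvGate th slr e = false := by simpa using hG
      simp [List.filter_cons, hG', ih, List.filter_filter]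

-- ===== VERDICT (by name: the statement is the Claim_ definition above) =====
theorem split_up_harrington_motifs_spec : Claim_equal_split_up_harrington_motifs := by
  intro hm th slr _ _
  unfold Spec_split_up_harrington_motifs split_up_harrington_motifs split_up_harrington_motifs_alt
  simp [pvFold_inv]
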